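-- pv_equiv track=rewrite | github.com/nyjgary/nlp-translation | train_eval.py | filter_output_indices
-- ===== SOURCE A (Python) =====
-- RESERVED_TOKENS = {'<SOS>': 0, '<EOS>': 1, '<PAD>': 2, '<UNK>': 3}
--
-- def filter_output_indices(list_indices):
--     # NEW 11/28
--     """ Filters out any tokens predicted after <EOS>, as well as <EOS>, <SOS>, and <PAD> themselves """
--
--     # drops everything after <EOS>
--     try:
--         output = list_indices[:list_indices.index(RESERVED_TOKENS['<EOS>'])]
--     except:
--         output = list_indices
--     # drops <SOS>, <EOS>, <PAD>
--     ignored_idx = [RESERVED_TOKENS[token] for token in ['<SOS>', '<EOS>', '<PAD>']]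
--     output = [idx for idx in output if idx not in ignored_idx]
--     return output
-- ===== SOURCE B (Python) =====
-- RESERVED_TOKENS = {'<SOS>': 0, '<EOS>': 1, '<PAD>': 2, '<UNK>': 3}
--
-- def filter_output_indices(list_indices):
--     """Single pass: stop at <EOS>, skip <SOS>/<PAD>, keep everything else."""
--     result = []
--     for idx in list_indices:
--         if idx == RESERVED_TOKENS['<EOS>']:
--             break
--         if idx == RESERVED_TOKENS['<SOS>'] or idx == RESERVED_TOKENS['<PAD>']:
--             continue
--         result.append(idx)
--     return result
-- ===== Notes on version B (the rewrite author's own statement) =====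
-- stated objective: simpler
-- what changed: Replaced the index/slice scan plus a second filtering comprehension by one explicit loop that breaks at <EOS> and skips <SOS>/<PAD>, building the result in a single pass.
import Mathlib
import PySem

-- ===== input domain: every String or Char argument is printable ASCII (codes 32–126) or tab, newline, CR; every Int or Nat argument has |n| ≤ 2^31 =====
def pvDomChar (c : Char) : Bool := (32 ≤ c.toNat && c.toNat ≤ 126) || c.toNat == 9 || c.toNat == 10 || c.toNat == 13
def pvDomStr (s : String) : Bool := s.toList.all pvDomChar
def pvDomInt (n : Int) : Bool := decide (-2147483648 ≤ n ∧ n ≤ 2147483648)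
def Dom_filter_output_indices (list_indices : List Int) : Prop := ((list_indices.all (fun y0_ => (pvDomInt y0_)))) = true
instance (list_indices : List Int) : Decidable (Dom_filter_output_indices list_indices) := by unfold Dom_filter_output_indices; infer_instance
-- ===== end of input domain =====

-- B fuses A's index/slice scan and filtering comprehension into one single-pass loop with an early break at <EOS> (objective: simpler).


-- ===== PORT A =====
-- try: output = list_indices[:list_indices.index(1)]  except: output = list_indices
-- output = [idx for idx in output if idx not in [0, 1, 2]]
def filter_output_indices (list_indices : List Int) : List Int :=
  let output : List Int :=
    match PySem.List.index? list_indices (1 : Int) with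
    | some i => PySem.List.slice list_indices none (some (i : Int))
    | none => list_indices
  output.filter (fun idx => !(idx == 0 || idx == 1 || idx == 2))

-- ===== PORT B =====
-- single loop: break at <EOS>(1), skip <SOS>(0)/<PAD>(2), append otherwise
def filter_output_indices_alt (list_indices : List Int) : List Int :=
  match list_indices with
  | [] => []
  | idx :: rest =>
    if idx == 1 then []
    else if idx == 0 || idx == 2 then filter_output_indices_alt rest
    else idx :: filter_output_indices_alt rest

-- ===== PRECONDITION & SPEC =====
def Spec_filter_output_indices (list_indices : List Int) (out : List Int) : Prop := out = filter_output_indices_alt list_indices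
instance (list_indices : List Int) (out : List Int) : Decidable (Spec_filter_output_indices list_indices out) := by unfold Spec_filter_output_indices; infer_instance

-- ===== CLAIM (what is proved, stated in full; the proofs are below) =====
def Claim_equal_filter_output_indices : Prop := ∀ (list_indices : List Int), Dom_filter_output_indices list_indices → Spec_filter_output_indices list_indices (filter_output_indices list_indices)

-- ===== LEMMAS AND PROOFS =====

-- A on a cons unfolds to exactly B's three-way case split.
theorem filter_output_indices_cons (x : Int) (xs : List Int) :
    filter_output_indices (x :: xs) =
      (if x = 1 then []
       else if x = 0 ∨ x = 2 then filter_output_indices xs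
       else x :: filter_output_indices xs) := by
  by_cases hx : x = 1
  · subst hx
    unfold filter_output_indices
    rw [PySem.List.index?_cons_self]
    simp [PySem.List.slice_to]
  · have hidx := PySem.List.index?_cons_of_ne (v := (1 : Int)) (xs := xs) hx
    unfold filter_output_indices
    rw [hidx]
    cases h : PySem.List.index? xs (1 : Int) with
    | none =>
        simp only [Option.map_none, List.filter_cons]
        by_cases h0 : x = 0
        · simp_all
        · by_cases h2 : x = 2 <;> simp_all
    | some i =>
        simp only [Option.map_some]
        rw [PySem.List.slice_to_natCast, PySem.List.slice_to_natCast]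
        simp only [List.take_succ_cons, List.filter_cons]
        by_cases h0 : x = 0
        · simp_all
        · by_cases h2 : x = 2 <;> simp_all

theorem ab_eq (l : List Int) : filter_output_indices l = filter_output_indices_alt l := by
  induction l with
  | nil => simp [filter_output_indices, filter_output_indices_alt, PySem.List.index?]
  | cons x xs ih =>
      rw [filter_output_indices_cons, filter_output_indices_alt]
      by_cases hx : x = 1
      · simp [hx]
      · by_cases h02 : x = 0 ∨ x = 2 <;> simp_all

-- ===== VERDICT (by name: the statement is the Claim_ definition above) =====
theorem filter_output_indices_spec : Claim_equal_filter_output_indices := by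
  intro l _
  unfold Spec_filter_output_indices
  exact ab_eq l
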